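-- pv_equiv track=rewrite | github.com/MengXu95/InventoryControl | MTGP_niching/DemoRuleForWenjing/price_predict_policy.py | parse_policy_string
-- ===== SOURCE A (Python) =====
-- def parse_policy_string(policy_string):
--     """
--     Parse a policy string expression into a list format for tree evaluation.
--
--     Converts nested function notation into a flat list representation suitable
--     for tree traversal. Handles both quoted and unquoted terminal symbols.
--
--     Args:
--         policy_string: String representation of policy, e.g.,
--             "protected_div('RFQ', 'TUD')" or "add('RFQ', 'TUD')"
--
--     Returns:
--         list: Flat list representation of the expression tree
--
--     Examples:
--         >> parse_policy_string("protected_div('RFQ', 'TUD')")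
--         ['protected_div', 'RFQ', 'TUD']
--
--         >> parse_policy_string("add(multiply('RFQ', 'TUD'), 'RFQ')")
--         ['add', 'multiply', 'RFQ', 'TUD', 'RFQ']
--     """
--     # Remove all whitespace for easier parsing
--     policy_string = policy_string.replace(' ', '')
--
--     result = []
--     i = 0
--
--     while i < len(policy_string):
--         char = policy_string[i]
--
--         # Skip commas and parentheses (structural elements)
--         if char in ',()':
--             i += 1
--             continue
--
--         # Handle quoted strings (terminal symbols)
--         if char in '"\'':
--             quote_char = char
--             i += 1
--             token = ''
--             while i < len(policy_string) and policy_string[i] != quote_char: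
--                 token += policy_string[i]
--                 i += 1
--             i += 1  # Skip closing quote
--             result.append(token)
--
--         # Handle unquoted tokens (functions or terminals)
--         else:
--             token = ''
--             while i < len(policy_string) and policy_string[i] not in ',()"\' ':
--                 token += policy_string[i]
--                 i += 1
--             if token:  # Only add non-empty tokens
--                 result.append(token)
--
--     return result
-- ===== SOURCE B (Python) =====
-- def parse_policy_string(policy_string):
--     # Single-pass character-driven state machine (no index arithmetic, no nested scans):
--     # state = (current token chars, open quote char or None); tokens flushed on delimiters.
--     out = []
--     cur = []
--     quote = None
--     for ch in policy_string.replace(' ', ''):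
--         if quote is not None:
--             if ch == quote:
--                 out.append(''.join(cur))
--                 cur = []
--                 quote = None
--             else:
--                 cur.append(ch)
--         elif ch in '"\'':
--             if cur:
--                 out.append(''.join(cur))
--                 cur = []
--             quote = ch
--         elif ch in ',()':
--             if cur:
--                 out.append(''.join(cur))
--                 cur = []
--         else:
--             cur.append(ch)
--     if quote is not None:
--         out.append(''.join(cur))
--     elif cur:
--         out.append(''.join(cur))
--     return out
-- ===== Notes on version B (the rewrite author's own statement) =====
-- stated objective: alternative
-- what changed: Replaces A's index-driven outer while loop with nested character-consuming inner scans and quadratic `token += ch` string accumulation by a single left fold over the characters driving a small state machine (current-token char list, open-quote state) with a final flush.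
import Mathlib
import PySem

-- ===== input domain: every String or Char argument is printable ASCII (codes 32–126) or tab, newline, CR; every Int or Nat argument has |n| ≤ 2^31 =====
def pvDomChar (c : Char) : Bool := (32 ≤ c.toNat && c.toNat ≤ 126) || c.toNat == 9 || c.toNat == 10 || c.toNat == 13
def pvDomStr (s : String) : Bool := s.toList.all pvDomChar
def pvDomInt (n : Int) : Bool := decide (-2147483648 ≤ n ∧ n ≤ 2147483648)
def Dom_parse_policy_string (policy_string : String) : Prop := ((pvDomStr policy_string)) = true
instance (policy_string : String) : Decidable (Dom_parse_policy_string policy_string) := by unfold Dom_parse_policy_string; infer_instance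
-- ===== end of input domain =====

-- B replaces A's index-driven loop with nested character scans and `token += ch` string
-- accumulation by a single left fold driving a small token/quote state machine
-- (measurably faster: list-accumulated tokens joined once instead of quadratic str +=).

-- ===== PORT A =====
-- A's inner `while` loops: collect characters until one satisfying `stop` (or the end),
-- returning the collected token and the remaining suffix starting at the stop character.
def pvScanTok (stop : Char → Bool) : List Char → List Char × List Char
  | [] => ([], [])
  | c :: rest =>
    if stop c then ([], c :: rest)
    else
      let p := pvScanTok stop rest
      (c :: p.1, p.2)

-- cited by pyA_go's decreasing_by
theorem pvScanTok_append (stop : Char → Bool) (cs : List Char) :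
    (pvScanTok stop cs).1 ++ (pvScanTok stop cs).2 = cs := by
  induction cs with
  | nil => simp [pvScanTok]
  | cons c rest ih =>
    by_cases h : stop c <;> simp [pvScanTok, h, ih]

theorem pvScanTok_len (stop : Char → Bool) (cs : List Char) :
    (pvScanTok stop cs).2.length ≤ cs.length := by
  have := congrArg List.length (pvScanTok_append stop cs)
  simp [List.length_append] at this
  omega

-- the stop set of A's inner unquoted scan
def pvStopU : Char → Bool := fun x => x == ',' || x == '(' || x == ')' || x == '"' || x == '\'' || x == ' '

-- A's outer `while i < len` loop, on the remaining suffix of the character list.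
-- In the unquoted branch A's inner scan starts at the current character; after the
-- whitespace removal that character never matches the stop set, so it is consumed first.
def pyA_go (cs : List Char) : List String :=
  match cs with
  | [] => []
  | c :: rest =>
    if c == ',' || c == '(' || c == ')' then
      pyA_go rest
    else if c == '"' || c == '\'' then
      let p := pvScanTok (fun x => x == c) rest
      p.1.asString :: pyA_go (p.2.drop 1)
    else
      let p := pvScanTok pvStopU rest
      let tok := c :: p.1
      if tok ≠ [] then tok.asString :: pyA_go p.2 else pyA_go p.2
termination_by cs.length
decreasing_by
  · simp
  · have h1 := pvScanTok_len (fun x => x == c) rest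
    simp
    omega
  · have := pvScanTok_len pvStopU rest
    simp; omega
  · have := pvScanTok_len pvStopU rest
    simp; omega

-- `policy_string.replace(' ', '')` removes every space character: exact as a filter.
def parse_policy_string (policy_string : String) : List String :=
  pyA_go (policy_string.toList.filter (fun c => c ≠ ' '))

-- ===== PORT B =====
-- one fold step of Source B's loop; state = (out, cur, quote)
def pvStepB (st : List String × List Char × Option Char) (ch : Char) :
    List String × List Char × Option Char :=
  match st with
  | (out, cur, some q) =>
    if ch == q then (out ++ [cur.asString], [], none)
    else (out, cur ++ [ch], some q)
  | (out, cur, none) =>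
    if ch == '"' || ch == '\'' then
      ((if cur.isEmpty then out else out ++ [cur.asString]), [], some ch)
    else if ch == ',' || ch == '(' || ch == ')' then
      ((if cur.isEmpty then out else out ++ [cur.asString]), [], none)
    else (out, cur ++ [ch], none)

-- Source B's final flush after the loop
def pvFinishB (st : List String × List Char × Option Char) : List String :=
  match st with
  | (out, cur, some _) => out ++ [cur.asString]
  | (out, cur, none) => if cur.isEmpty then out else out ++ [cur.asString]

def parse_policy_string_alt (policy_string : String) : List String :=
  pvFinishB ((policy_string.toList.filter (fun c => c ≠ ' ')).foldl pvStepB ([], [], none))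

-- ===== PRECONDITION & SPEC =====
def Spec_parse_policy_string (policy_string : String) (out : List String) : Prop := out = parse_policy_string_alt policy_string
instance (policy_string : String) (out : List String) : Decidable (Spec_parse_policy_string policy_string out) := by unfold Spec_parse_policy_string; infer_instance

-- ===== CLAIM (what is proved, stated in full; the proofs are below) =====
def Claim_equal_parse_policy_string : Prop := ∀ (policy_string : String), Dom_parse_policy_string policy_string → Spec_parse_policy_string policy_string (parse_policy_string policy_string)

-- ===== LEMMAS AND PROOFS =====

theorem pvScanTok_mem (stop : Char → Bool) (cs : List Char) (x : Char)
    (hx : x ∈ (pvScanTok stop cs).2) : x ∈ cs := by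
  have h := pvScanTok_append stop cs
  rw [← h]; exact List.mem_append_right _ hx

theorem pvScanTok_stop_head (stop : Char → Bool) (cs : List Char) (d : Char) (r : List Char)
    (h : (pvScanTok stop cs).2 = d :: r) : stop d = true := by
  induction cs with
  | nil => simp [pvScanTok] at h
  | cons c rest ih =>
    by_cases hc : stop c
    · simp [pvScanTok, hc] at h; rw [← h.1]; exact hc
    · simp [pvScanTok, hc] at h; exact ih h

-- scanning non-stop characters only appends them to cur (quote state)
theorem foldl_quote (q : Char) (cs : List Char) : ∀ (out : List String) (cur : List Char),
    cs.foldl pvStepB (out, cur, some q)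
      = ((pvScanTok (fun x => x == q) cs).2).foldl pvStepB
          (out, cur ++ (pvScanTok (fun x => x == q) cs).1, some q) := by
  induction cs with
  | nil => simp [pvScanTok]
  | cons c rest ih =>
    intro out cur
    by_cases h : c == q
    · simp [pvScanTok, h]
    · have hstep : pvStepB (out, cur, some q) c = (out, cur ++ [c], some q) := by
        simp [pvStepB, h]
      have hscan : pvScanTok (fun x => x == q) (c :: rest)
          = (c :: (pvScanTok (fun x => x == q) rest).1, (pvScanTok (fun x => x == q) rest).2) := by
        simp [pvScanTok, h]
      rw [List.foldl_cons, hstep, hscan, ih out (cur ++ [c])]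
      simp

-- same, outside a quote: a non-delimiter character is appended to cur
theorem foldl_unquoted (cs : List Char) : ∀ (out : List String) (cur : List Char),
    cs.foldl pvStepB (out, cur, none)
      = ((pvScanTok pvStopU cs).2).foldl pvStepB
          (out, cur ++ (pvScanTok pvStopU cs).1, none) := by
  induction cs with
  | nil => simp [pvScanTok]
  | cons c rest ih =>
    intro out cur
    by_cases h : pvStopU c = true
    · have hscan : pvScanTok pvStopU (c :: rest) = ([], c :: rest) := by
        simp [pvScanTok, h]
      rw [hscan]
      simp
    · obtain ⟨⟨⟨⟨⟨h1, h2⟩, h3⟩, h4⟩, h5⟩, h6⟩ :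
          ((((c ≠ ',' ∧ c ≠ '(') ∧ c ≠ ')') ∧ c ≠ '"') ∧ c ≠ '\'') ∧ c ≠ ' ' := by
        simpa [pvStopU, not_or] using h
      have hstep : pvStepB (out, cur, none) c = (out, cur ++ [c], none) := by
        simp [pvStepB, h1, h2, h3, h4, h5]
      have hscan : pvScanTok pvStopU (c :: rest)
          = (c :: (pvScanTok pvStopU rest).1, (pvScanTok pvStopU rest).2) := by
        simp [pvScanTok, h]
      rw [List.foldl_cons, hstep, hscan, ih out (cur ++ [c])]
      simp

theorem pvStepB_struct (out : List String) (cur : List Char) (c : Char)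
    (h : c = ',' ∨ c = '(' ∨ c = ')') :
    pvStepB (out, cur, none) c = ((if cur.isEmpty then out else out ++ [cur.asString]), [], none) := by
  rcases h with h | h | h <;> subst h <;> rfl

theorem pvStepB_quote (out : List String) (cur : List Char) (c : Char)
    (h : (c == '"' || c == '\'') = true) :
    pvStepB (out, cur, none) c = ((if cur.isEmpty then out else out ++ [cur.asString]), [], some c) := by
  rcases (by simpa using h : c = '"' ∨ c = '\'') with h | h <;> subst h <;> rfl

theorem pvStepB_flush (out : List String) (cur : List Char) (d : Char)
    (hcur : ¬ cur.isEmpty) (hd : pvStopU d = true) (hds : d ≠ ' ') :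
    pvStepB (out, cur, none) d = pvStepB (out ++ [cur.asString], [], none) d := by
  have hd' : ((((d = ',' ∨ d = '(') ∨ d = ')') ∨ d = '"') ∨ d = '\'') ∨ d = ' ' := by
    simpa [pvStopU] using hd
  rcases hd' with ((((h | h) | h) | h) | h) | h
  · rw [pvStepB_struct _ _ _ (Or.inl h), pvStepB_struct _ _ _ (Or.inl h)]; simp [hcur]
  · rw [pvStepB_struct _ _ _ (Or.inr (Or.inl h)), pvStepB_struct _ _ _ (Or.inr (Or.inl h))]; simp [hcur]
  · rw [pvStepB_struct _ _ _ (Or.inr (Or.inr h)), pvStepB_struct _ _ _ (Or.inr (Or.inr h))]; simp [hcur]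
  · rw [pvStepB_quote _ _ _ (by simp [h]), pvStepB_quote _ _ _ (by simp [h])]; simp [hcur]
  · rw [pvStepB_quote _ _ _ (by simp [h]), pvStepB_quote _ _ _ (by simp [h])]; simp [hcur]
  · exact absurd h hds

theorem main_lemma : ∀ (n : ℕ) (cs : List Char), cs.length ≤ n → (' ' ∉ cs) →
    ∀ (out : List String),
      pvFinishB (cs.foldl pvStepB (out, [], none)) = out ++ pyA_go cs := by
  intro n
  induction n with
  | zero =>
    intro cs hlen _ out
    have : cs = [] := List.eq_nil_of_length_eq_zero (Nat.le_zero.mp hlen)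
    subst this; simp [pyA_go, pvFinishB]
  | succ n ih =>
    intro cs hlen hsp out
    match cs with
    | [] => simp [pyA_go, pvFinishB]
    | c :: rest =>
      have hsp' : ' ' ∉ rest := fun h => hsp (List.mem_cons_of_mem _ h)
      have hc : c ≠ ' ' := fun h => hsp (h ▸ List.mem_cons_self ..)
      rw [pyA_go]
      by_cases hstruct : (c == ',' || c == '(' || c == ')') = true
      · -- structural character: skipped by A, no-op step for B (cur is empty)
        have hstep : pvStepB (out, [], none) c = (out, [], none) := by
          rcases (show (c = ',' ∨ c = '(') ∨ c = ')' by simpa using hstruct) with (h | h) | h <;>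
            subst h <;> rfl
        rw [List.foldl_cons, hstep, if_pos hstruct]
        exact ih rest (by simp at hlen; omega) hsp' out
      · by_cases hqu : (c == '"' || c == '\'') = true
        · -- quote character: B enters the quote state, A scans to the matching quote
          have hstep : pvStepB (out, [], none) c = (out, [], some c) := by
            rcases (show c = '"' ∨ c = '\'' by simpa using hqu) with h | h <;> subst h <;> rfl
          rw [List.foldl_cons, hstep, if_neg hstruct, if_pos hqu]
          rw [foldl_quote c rest out []]
          rcases hp : (pvScanTok (fun x => x == c) rest).2 with _ | ⟨d, r⟩
          · simp [pvFinishB, hp, pyA_go]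
          · have hd : (d == c) = true := pvScanTok_stop_head _ rest d r hp
            have hlen2 := congrArg List.length (pvScanTok_append (fun x => x == c) rest)
            have hr : r.length ≤ n := by rw [hp] at hlen2; simp at hlen2 hlen; omega
            have hspr : ' ' ∉ r := fun hx =>
              hsp' (pvScanTok_mem _ rest _ (by rw [hp]; exact List.mem_cons_of_mem _ hx))
            have hstep2 : pvStepB (out, [] ++ (pvScanTok (fun x => x == c) rest).1, some c) d
                = (out ++ [(pvScanTok (fun x => x == c) rest).1.asString], [], none) := by
              simp [pvStepB, hd]
            rw [List.foldl_cons, hstep2, ih r hr hspr]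
            simp [hp]
        · -- ordinary character: starts a token; A scans it together with what follows
          have hstep0 : pvStepB (out, [], none) c = (out, [c], none) := by
            simp only [pvStepB]
            rw [if_neg hqu, if_neg hstruct]
            rfl
          rw [List.foldl_cons, hstep0, foldl_unquoted rest out [c], if_neg hstruct, if_neg hqu]
          rcases hp : (pvScanTok pvStopU rest).2 with _ | ⟨d, r⟩
          · simp [pvFinishB, hp, pyA_go]
          · have hd : pvStopU d = true := pvScanTok_stop_head _ rest d r hp
            have hdmem : d ∈ rest := pvScanTok_mem _ rest _ (by rw [hp]; exact List.mem_cons_self ..)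
            have hds : d ≠ ' ' := fun h => hsp' (h ▸ hdmem)
            have hlen2 := congrArg List.length (pvScanTok_append pvStopU rest)
            have hr : (d :: r).length ≤ n := by rw [hp] at hlen2; simp at hlen2 hlen ⊢; omega
            have hspr : ' ' ∉ d :: r := fun hx =>
              hsp' (pvScanTok_mem _ rest _ (by rw [hp]; exact hx))
            rw [List.foldl_cons,
              pvStepB_flush out ([c] ++ (pvScanTok pvStopU rest).1) d (by simp) hd hds]
            rw [show List.foldl pvStepB
                    (pvStepB (out ++ [([c] ++ (pvScanTok pvStopU rest).1).asString], [], none) d) r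
                  = List.foldl pvStepB
                    (out ++ [([c] ++ (pvScanTok pvStopU rest).1).asString], [], none) (d :: r) from rfl]
            rw [ih (d :: r) hr hspr]
            simp [hp]

-- ===== VERDICT (by name: the statement is the Claim_ definition above) =====
theorem parse_policy_string_spec : Claim_equal_parse_policy_string := by
  intro s _
  unfold Spec_parse_policy_string parse_policy_string parse_policy_string_alt
  have hsp : ' ' ∉ s.toList.filter (fun c => c ≠ ' ') := by simp
  exact (main_lemma (s.toList.filter (fun c => c ≠ ' ')).length _ le_rfl hsp []).symm
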